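-- pv_equiv track=rewrite | github.com/MrBrantCode/unitest_baseline | mut_generate/mist_train_cf/cf_13165/solution.py | longest_consecutive_substring
-- ===== SOURCE A (Python) =====
-- def longest_consecutive_substring(string):
--     if len(string) == 0:
--         return ""
--
--     longest_substring = string[0]
--     current_substring = string[0]
--
--     for i in range(1, len(string)):
--         if ord(string[i]) - ord(string[i-1]) == 1:
--             current_substring += string[i]
--         else:
--             current_substring = string[i]
--
--         if len(current_substring) > len(longest_substring):
--             longest_substring = current_substring
--
--     return longest_substring
-- ===== SOURCE B (Python) =====
-- def longest_consecutive_substring(string):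
--     if len(string) == 0:
--         return ""
--     runs = []
--     cur = string[0]
--     for prev, c in zip(string, string[1:]):
--         if ord(c) - ord(prev) == 1:
--             cur += c
--         else:
--             runs.append(cur)
--             cur = c
--     runs.append(cur)
--     return max(runs, key=len)
-- ===== Notes on version B (the rewrite author's own statement) =====
-- stated objective: simpler
-- what changed: A interleaves run-building with a running best in one scan-and-compare loop; B first cuts the string into the list of maximal consecutive runs and then selects the first longest run with max(runs, key=len).
import Mathlib
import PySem

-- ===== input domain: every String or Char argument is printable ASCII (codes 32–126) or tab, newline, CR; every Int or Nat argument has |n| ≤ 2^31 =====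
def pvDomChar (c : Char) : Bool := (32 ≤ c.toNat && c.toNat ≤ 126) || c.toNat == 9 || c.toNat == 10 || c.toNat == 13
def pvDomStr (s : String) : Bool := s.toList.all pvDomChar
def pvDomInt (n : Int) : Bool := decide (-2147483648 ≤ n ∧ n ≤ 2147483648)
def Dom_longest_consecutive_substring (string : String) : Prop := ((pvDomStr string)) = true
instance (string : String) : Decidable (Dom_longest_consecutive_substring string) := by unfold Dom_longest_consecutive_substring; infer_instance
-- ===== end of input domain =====

-- B replaces A's interleaved scan-and-compare loop by a two-phase decomposition:
-- cut the string into maximal consecutive runs, then select the first longest (objective: simpler).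


-- ===== PORT A =====
-- A's loop 'for i in range(1, len(string))' reads string[i] and string[i-1]; it is ported as a
-- fold over the adjacent pairs (string[i-1], string[i]), i.e. zip string string[1:], with the
-- same state (longest_substring, current_substring).
def pvStepA (st : List Char × List Char) (pr : Char × Char) : List Char × List Char :=
  let cur := if (pr.2.toNat : Int) - (pr.1.toNat : Int) = 1 then st.2 ++ [pr.2] else [pr.2]
  (if cur.length > st.1.length then cur else st.1, cur)

def longest_consecutive_substring (string : String) : String :=
  match string.toList with
  | [] => ""
  | c :: rest =>
    (String.mk ((List.zip (c :: rest) rest).foldl pvStepA ([c], [c])).1)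

-- ===== PORT B =====
-- the run-splitting pass: maximal runs of consecutive (+1) characters
def pvRunsGo (cur : List Char) (prev : Char) : List Char → List (List Char)
  | [] => [cur]
  | c :: rest =>
    if (c.toNat : Int) - (prev.toNat : Int) = 1 then pvRunsGo (cur ++ [c]) c rest
    else cur :: pvRunsGo [c] c rest

-- max(runs, key=len): first run of maximal length (strict-greater update)
def pvMaxLen (best r : List Char) : List Char := if r.length > best.length then r else best

def longest_consecutive_substring_alt (string : String) : String :=
  match string.toList with
  | [] => ""
  | c :: rest =>
    match pvRunsGo [c] c rest with
    | [] => ""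
    | r :: rs => String.mk (rs.foldl pvMaxLen r)

-- ===== PRECONDITION & SPEC =====
def Spec_longest_consecutive_substring (string : String) (out : String) : Prop := out = longest_consecutive_substring_alt string
instance (string : String) (out : String) : Decidable (Spec_longest_consecutive_substring string out) := by unfold Spec_longest_consecutive_substring; infer_instance

-- ===== CLAIM (what is proved, stated in full; the proofs are below) =====
def Claim_equal_longest_consecutive_substring : Prop := ∀ (string : String), Dom_longest_consecutive_substring string → Spec_longest_consecutive_substring string (longest_consecutive_substring string)

-- ===== LEMMAS AND PROOFS =====

-- the head of pvRunsGo cur prev rest extends cur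
lemma pvRunsGo_head : ∀ (rest : List Char) (cur : List Char) (prev : Char),
    ∃ t rs, pvRunsGo cur prev rest = (cur ++ t) :: rs := by
  intro rest
  induction rest with
  | nil => intro cur prev; exact ⟨[], [], by simp [pvRunsGo]⟩
  | cons c rest ih =>
    intro cur prev
    by_cases h : (c.toNat : Int) - (prev.toNat : Int) = 1
    · obtain ⟨t, rs, ht⟩ := ih (cur ++ [c]) c
      exact ⟨[c] ++ t, rs, by simp [pvRunsGo, h, ht]⟩
    · exact ⟨[], pvRunsGo [c] c rest, by simp [pvRunsGo, h]⟩

-- the key invariant: A's fold equals folding pvMaxLen over the runs,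
-- provided the current run is nonempty and no longer than the best so far
lemma key : ∀ (rest : List Char) (prev : Char) (cur lng : List Char),
    cur ≠ [] → cur.length ≤ lng.length →
    ((List.zip (prev :: rest) rest).foldl pvStepA (lng, cur)).1
      = (pvRunsGo cur prev rest).foldl pvMaxLen lng := by
  intro rest
  induction rest with
  | nil => intro prev cur lng hne hle; simp [pvRunsGo, pvMaxLen, List.foldl]; omega
  | cons c rest ih =>
    intro prev cur lng hne hle
    have hzip : List.zip (prev :: c :: rest) (c :: rest)
        = (prev, c) :: List.zip (c :: rest) rest := by simp [List.zip]
    rw [hzip]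
    by_cases h : (c.toNat : Int) - (prev.toNat : Int) = 1
    · -- consecutive: current grows
      have hstep : pvStepA (lng, cur) (prev, c)
          = (if (cur ++ [c]).length > lng.length then cur ++ [c] else lng, cur ++ [c]) := by
        simp [pvStepA, h]
      rw [List.foldl_cons, hstep]
      have hrec : pvRunsGo cur prev (c :: rest) = pvRunsGo (cur ++ [c]) c rest := by
        simp [pvRunsGo, h]
      rw [hrec]
      by_cases hgt : (cur ++ [c]).length > lng.length
      · simp only [hgt, if_pos]
        rw [ih c (cur ++ [c]) (cur ++ [c]) (by simp) (le_refl _)]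
        -- init lng vs init (cur ++ [c]); the head run extends cur ++ [c]
        obtain ⟨t, rs, ht⟩ := pvRunsGo_head rest (cur ++ [c]) c
        rw [ht]
        have hgt' : cur.length + 1 > lng.length := by simpa using hgt
        have h1 : pvMaxLen lng ((cur ++ [c]) ++ t) = (cur ++ [c]) ++ t := by
          simp only [pvMaxLen, List.length_append, List.length_cons, List.length_nil]
          rw [if_pos (by omega)]
        have h2 : pvMaxLen (cur ++ [c]) ((cur ++ [c]) ++ t) = (cur ++ [c]) ++ t := by
          rcases t with _ | ⟨x, t⟩
          · simp [pvMaxLen]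
          · simp [pvMaxLen]
        simp only [List.foldl_cons, h1, h2]
      · simp only [hgt, if_neg, if_false]
        exact ih c (cur ++ [c]) lng (by simp) (by omega)
    · -- break: current resets to [c], longest unchanged (lng is nonempty)
      have hlen1 : 1 ≤ lng.length := le_trans (by cases cur <;> simp_all) hle
      have hstep : pvStepA (lng, cur) (prev, c) = (lng, [c]) := by
        simp only [pvStepA, h, if_false]
        rw [if_neg (by simp only [List.length_cons, List.length_nil]; omega)]
      rw [List.foldl_cons, hstep]
      have hrec : pvRunsGo cur prev (c :: rest) = cur :: pvRunsGo [c] c rest := by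
        simp [pvRunsGo, h]
      rw [hrec]
      have hmax : pvMaxLen lng cur = lng := by simp [pvMaxLen]; omega
      rw [List.foldl_cons, hmax]
      exact ih c [c] lng (by simp) hlen1

-- ===== VERDICT (by name: the statement is the Claim_ definition above) =====
theorem longest_consecutive_substring_spec : Claim_equal_longest_consecutive_substring := by
  intro string _
  unfold Spec_longest_consecutive_substring longest_consecutive_substring longest_consecutive_substring_alt
  cases hs : string.toList with
  | nil => rfl
  | cons c rest =>
    obtain ⟨t, rs, ht⟩ := pvRunsGo_head rest [c] c
    dsimp only
    rw [key rest c [c] [c] (by simp) (le_refl _), ht]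
    have h1 : pvMaxLen [c] ([c] ++ t) = [c] ++ t := by
      rcases t with _ | ⟨x, t⟩
      · simp [pvMaxLen]
      · simp [pvMaxLen]
    simp only [List.foldl_cons, h1]
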